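-- pv_equiv track=rewrite | github.com/pywhatwgurl/pywhatwgurl | pywhatwgurl/host.py | _serialize_ipv6
-- ===== SOURCE A (Python) =====
-- def _find_ipv6_compress_index(address: list[int]) -> int | None:
--     """Find the start index of the longest run of zero pieces for :: compression."""
--     longest_index: int | None = None
--     longest_size = 1
--     current_index: int | None = None
--     current_size = 0
--
--     for i, piece in enumerate(address):
--         if piece != 0:
--             if current_size > longest_size:
--                 longest_index = current_index
--                 longest_size = current_size
--             current_index = None
--             current_size = 0
--         else:
--             if current_index is None:
--                 current_index = i
--             current_size += 1
--
--     if current_size > longest_size: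
--         return current_index
--     return longest_index
--
-- def _serialize_ipv6(address: list[int]) -> str:
--     """Serialize an IPv6 address to string notation."""
--     compress = _find_ipv6_compress_index(address)
--     ignore_zero = False
--     output: list[str] = []
--
--     for i, piece in enumerate(address):
--         if ignore_zero and piece == 0:
--             continue
--         elif ignore_zero:
--             ignore_zero = False
--
--         if compress == i:
--             output.append("::" if i == 0 else ":")
--             ignore_zero = True
--             continue
--
--         output.append(f"{piece:x}")
--         if i != 7:
--             output.append(":")
--
--     return "".join(output)
-- ===== SOURCE B (Python) =====
-- def _zero_run_len(address, i):
--     j = i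
--     while j < len(address) and address[j] == 0:
--         j += 1
--     return j - i
--
-- def _find_best_zero_run(address):
--     """Earliest longest run of zero pieces (length >= 2), as (start, length)."""
--     best_idx, best_len = None, 1
--     i, n = 0, len(address)
--     while i < n:
--         if address[i] == 0:
--             z = _zero_run_len(address, i)
--             if z > best_len:
--                 best_idx, best_len = i, z
--             i += z
--         else:
--             i += 1
--     return best_idx, best_len
--
-- def _serialize_ipv6(address):
--     pieces = [format(p, "x") for p in address]
--     idx, length = _find_best_zero_run(address)
--     if idx is None:
--         return "".join(p + ("" if k == 7 else ":") for k, p in enumerate(pieces))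
--     head = "".join(p + ("" if k == 7 else ":") for k, p in enumerate(pieces[:idx]))
--     tail = "".join(p + ("" if k == 7 else ":") for k, p in enumerate(pieces[idx + length:], idx + length))
--     return head + ("::" if idx == 0 else ":") + tail
-- ===== Notes on version B (the rewrite author's own statement) =====
-- stated objective: simpler
-- what changed: A's two flag-state-machines (longest_index/current_size tracker and an ignore_zero serializer loop) are replaced by a run-jumping scan for the best zero run plus slice-and-join assembly of the result string.
import Mathlib
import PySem

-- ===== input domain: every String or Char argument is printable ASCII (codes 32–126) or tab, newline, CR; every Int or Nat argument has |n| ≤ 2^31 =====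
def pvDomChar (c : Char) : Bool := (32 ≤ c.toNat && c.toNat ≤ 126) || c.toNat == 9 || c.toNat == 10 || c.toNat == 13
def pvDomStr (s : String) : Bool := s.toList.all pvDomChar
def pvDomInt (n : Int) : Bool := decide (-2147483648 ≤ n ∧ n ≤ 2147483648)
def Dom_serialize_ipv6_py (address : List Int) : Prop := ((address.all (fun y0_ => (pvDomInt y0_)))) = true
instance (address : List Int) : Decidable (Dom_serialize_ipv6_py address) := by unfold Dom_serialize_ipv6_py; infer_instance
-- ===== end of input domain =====

-- B rewrites A's two flag-state-machine passes as run-scanning plus slice/join assembly; objective: simpler.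

-- ===== PORT A =====

-- shared helper of both ports: Python's format(p, "x") — lowercase hex, '-' before the digits
-- of |p| for negative p (hand port, exact for every int)
def pyHexAux (n : Nat) (acc : List Char) : List Char :=
  if h : n = 0 then acc
  else pyHexAux (n / 16) (Char.ofNat (if n % 16 < 10 then 48 + n % 16 else 87 + n % 16) :: acc)
  termination_by n
  decreasing_by exact Nat.div_lt_self (Nat.pos_of_ne_zero h) (by omega)

def pyHex (p : Int) : String :=
  if p < 0 then String.ofList ('-' :: pyHexAux (-p).toNat [])
  else if p = 0 then "0"
  else String.ofList (pyHexAux p.toNat [])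

-- _find_ipv6_compress_index's loop: state (longest_index, longest_size, current_index, current_size)
def findCompressAux : List Int → Int → Option Int → Int → Option Int → Int → Option Int
  | [], _i, li, ls, ci, cs => if cs > ls then ci else li
  | p :: rest, i, li, ls, ci, cs =>
    if p ≠ 0 then
      if cs > ls then findCompressAux rest (i + 1) ci cs none 0
      else findCompressAux rest (i + 1) li ls none 0
    else
      if ci = none then findCompressAux rest (i + 1) li ls (some i) (cs + 1)
      else findCompressAux rest (i + 1) li ls ci (cs + 1)

def findCompress (address : List Int) : Option Int :=
  findCompressAux address 0 none 1 none 0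

-- _serialize_ipv6's loop: state (ignore_zero, output)
def serAAux : List Int → Int → Option Int → Bool → List String → List String
  | [], _i, _compress, _ig, out => out
  | p :: rest, i, compress, ig, out =>
    if ig = true ∧ p = 0 then serAAux rest (i + 1) compress ig out
    else if compress = some i then
      serAAux rest (i + 1) compress true (out ++ [if i = 0 then "::" else ":"])
    else
      serAAux rest (i + 1) compress false (out ++ if i ≠ 7 then [pyHex p, ":"] else [pyHex p])

def serialize_ipv6_py (address : List Int) : String :=
  PySem.Str.join "" (serAAux address 0 (findCompress address) false [])

-- ===== PORT B =====

-- _zero_run_len(address, i): the while loop counting zeros from position i (here: on the suffix)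
def zeroRunLen : List Int → Nat
  | [] => 0
  | x :: r => if x = 0 then zeroRunLen r + 1 else 0

-- _find_best_zero_run's while loop: jump over each zero run, keep the best (strictly longer wins)
def findBestAux (xs : List Int) (i : Nat) (bi : Option Nat) (bl : Nat) : Option Nat × Nat :=
  match xs with
  | [] => (bi, bl)
  | x :: rest =>
    if x = 0 then
      let z := zeroRunLen (x :: rest)
      if z > bl then findBestAux (rest.drop (z - 1)) (i + z) (some i) z
      else findBestAux (rest.drop (z - 1)) (i + z) bi bl
    else findBestAux rest (i + 1) bi bl
  termination_by xs.length
  decreasing_by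
    all_goals first
      | (simp [List.length_drop]; omega)
      | simp

-- "".join(p + ("" if k == 7 else ":") for k, p in enumerate(pieces, start))
def chunkB (pieces : List String) (start : Int) : String :=
  PySem.Str.join "" ((PySem.List.enumerate pieces start).map (fun kp => kp.2 ++ if kp.1 = 7 then "" else ":"))

def serialize_ipv6_py_alt (address : List Int) : String :=
  let pieces := address.map pyHex
  match findBestAux address 0 none 1 with
  | (none, _) => chunkB pieces 0
  | (some idx, len) =>
    chunkB (pieces.take idx) 0 ++ (if idx = 0 then "::" else ":")
      ++ chunkB (pieces.drop (idx + len)) ((idx : Int) + (len : Int))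

-- ===== PRECONDITION & SPEC =====
def Spec_serialize_ipv6_py (address : List Int) (out : String) : Prop := out = serialize_ipv6_py_alt address
instance (address : List Int) (out : String) : Decidable (Spec_serialize_ipv6_py address out) := by unfold Spec_serialize_ipv6_py; infer_instance

-- ===== CLAIM (what is proved, stated in full; the proofs are below) =====
def Claim_equal_serialize_ipv6_py : Prop := ∀ (address : List Int), Dom_serialize_ipv6_py address → Spec_serialize_ipv6_py address (serialize_ipv6_py address)

-- ===== LEMMAS AND PROOFS =====

-- the tokens A's loop emits for a stretch it serializes normally (no compression inside)
def normToks : List Int → Int → List String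
  | [], _ => []
  | p :: rest, i => (if i ≠ 7 then [pyHex p, ":"] else [pyHex p]) ++ normToks rest (i + 1)

theorem intercalate_nil_sep (l : List (List Char)) :
    List.intercalate ([] : List Char) l = l.flatten := by
  induction l with
  | nil => simp [List.intercalate]
  | cons a r ih =>
    cases r with
    | nil => simp [List.intercalate]
    | cons b t =>
      simp [List.intercalate, List.intersperse] at ih ⊢
      simpa using ih

theorem chars_join0 (l : List (List Char)) : PySem.Chars.join [] l = l.flatten := by
  simp [PySem.Chars.join, intercalate_nil_sep]

theorem join0_append (a b : List String) :
    PySem.Str.join "" (a ++ b) = PySem.Str.join "" a ++ PySem.Str.join "" b := by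
  apply String.toList_inj.mp
  simp [chars_join0]

theorem join0_singleton (s : String) : PySem.Str.join "" [s] = s := by
  apply String.toList_inj.mp
  simp

-- zeroRunLen is the length of the maximal leading zero run
theorem zeroRunLen_decomp (xs : List Int) :
    xs = List.replicate (zeroRunLen xs) 0 ++ xs.drop (zeroRunLen xs) := by
  induction xs with
  | nil => simp [zeroRunLen]
  | cons x r ih =>
    by_cases hx : x = 0
    · simp [zeroRunLen, hx, List.replicate_succ]
      conv_lhs => rw [ih]
    · simp [zeroRunLen, hx]

theorem zeroRunLen_head (xs : List Int) :
    (xs.drop (zeroRunLen xs)).head? ≠ some 0 := by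
  induction xs with
  | nil => simp
  | cons x r ih =>
    by_cases hx : x = 0
    · simpa [zeroRunLen, hx] using ih
    · simp [zeroRunLen, hx]

-- A's finder walking a zero run it is already inside
theorem findCompress_zeros (k : Nat) (rest : List Int) (i : Int) (li : Option Int) (ls : Int)
    (c m : Int) :
    findCompressAux (List.replicate k 0 ++ rest) i li ls (some c) m
      = findCompressAux rest (i + k) li ls (some c) (m + k) := by
  induction k generalizing i m with
  | zero => simp
  | succ k ih =>
    rw [List.replicate_succ]
    simp only [findCompressAux, List.cons_append]
    rw [if_neg (by simp)]
    rw [if_neg (by simp)]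
    rw [ih]
    congr 1 <;> push_cast <;> ring

-- the two run finders agree (A's longest_index = B's best_idx)
theorem find_equiv : ∀ (n : Nat) (xs : List Int) (i : Nat) (bi : Option Nat) (bl : Nat),
    xs.length ≤ n → 1 ≤ bl →
    findCompressAux xs i (bi.map (fun m : Nat => (m : Int))) bl none 0
      = ((findBestAux xs i bi bl).1).map (fun m : Nat => (m : Int)) := by
  intro n
  induction n with
  | zero =>
    intro xs i bi bl hlen hbl
    have hx : xs = [] := List.length_eq_zero_iff.mp (Nat.le_zero.mp hlen)
    subst hx
    rw [findBestAux]
    simp only [findCompressAux]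
    rw [if_neg (by omega)]
  | succ n ih =>
    intro xs i bi bl hlen hbl
    cases xs with
    | nil =>
      rw [findBestAux]
      simp only [findCompressAux]
      rw [if_neg (by omega)]
    | cons x rest =>
      have hlen' : rest.length ≤ n := by simpa using hlen
      by_cases hx : x = 0
      · subst hx
        have hA1 : findCompressAux ((0:Int) :: rest) i (bi.map (fun m : Nat => (m : Int))) bl none 0
            = findCompressAux rest ((i : Int) + 1) (bi.map (fun m : Nat => (m : Int))) bl (some i) 1 := by
          simp [findCompressAux]
        set w := zeroRunLen rest with hw
        have hdecomp : rest = List.replicate w 0 ++ rest.drop w := zeroRunLen_decomp rest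
        have hhead : (rest.drop w).head? ≠ some 0 := zeroRunLen_head rest
        have hA2 : findCompressAux rest ((i : Int) + 1) (bi.map (fun m : Nat => (m : Int))) bl (some i) 1
            = findCompressAux (rest.drop w) ((i : Int) + 1 + w) (bi.map (fun m : Nat => (m : Int))) bl (some i) (1 + w) := by
          conv_lhs => rw [hdecomp]
          rw [findCompress_zeros]
        have hB : findBestAux ((0:Int) :: rest) i bi bl
            = if w + 1 > bl then findBestAux (rest.drop w) (i + (w + 1)) (some i) (w + 1)
              else findBestAux (rest.drop w) (i + (w + 1)) bi bl := by
          rw [findBestAux]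
          simp [zeroRunLen, ← hw]
        rw [hA1, hA2, hB]
        cases hrest' : rest.drop w with
        | nil =>
          by_cases hzb : w + 1 > bl
          · rw [if_pos hzb, findBestAux]
            simp only [findCompressAux]
            rw [if_pos (by omega)]
            simp
          · rw [if_neg hzb, findBestAux]
            simp only [findCompressAux]
            rw [if_neg (by omega)]
        | cons q r =>
          have hq : q ≠ 0 := by
            intro h; exact hhead (by simp [hrest', h])
          have hrlen : r.length ≤ n := by
            have h1 : (rest.drop w).length = rest.length - w := List.length_drop
            rw [hrest'] at h1
            simp at h1
            omega
          have hstepA : ∀ (li : Option Int) (ls cs : Int),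
              findCompressAux (q :: r) ((i : Int) + 1 + w) li ls (some i) cs
                = if cs > ls then findCompressAux r ((i : Int) + 1 + w + 1) (some i) cs none 0
                  else findCompressAux r ((i : Int) + 1 + w + 1) li ls none 0 := by
            intro li ls cs
            simp only [findCompressAux]
            rw [if_pos hq]
          have hstepB : ∀ (bi' : Option Nat) (bl' : Nat),
              findBestAux (q :: r) (i + (w + 1)) bi' bl' = findBestAux r (i + (w + 1) + 1) bi' bl' := by
            intro bi' bl'
            rw [findBestAux]
            rw [if_neg hq]
          by_cases hzb : w + 1 > bl
          · rw [if_pos hzb, hstepB, hstepA]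
            rw [if_pos (by omega)]
            have := ih r (i + (w + 1) + 1) (some i) (w + 1) hrlen (by omega)
            rw [show ((i : Int) + 1 + ↑w + 1) = ((i + (w + 1) + 1 : Nat) : Int) by push_cast; ring,
                show ((1 : Int) + ↑w) = ((w + 1 : Nat) : Int) by push_cast; ring]
            simpa using this
          · rw [if_neg hzb, hstepB, hstepA]
            rw [if_neg (by omega)]
            have := ih r (i + (w + 1) + 1) bi bl hrlen hbl
            rw [show ((i : Int) + 1 + ↑w + 1) = ((i + (w + 1) + 1 : Nat) : Int) by push_cast; ring]
            exact this
      · have hA : findCompressAux (x :: rest) i (bi.map (fun m : Nat => (m : Int))) bl none 0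
            = findCompressAux rest ((i : Int) + 1) (bi.map (fun m : Nat => (m : Int))) bl none 0 := by
          simp only [findCompressAux]
          rw [if_pos hx, if_neg (by omega)]
        rw [hA, findBestAux, if_neg hx]
        have := ih rest (i + 1) bi bl hlen' hbl
        rw [show ((i : Int) + 1) = ((i + 1 : Nat) : Int) by push_cast; ring]
        exact this

-- what B's finder finds: a maximal zero run of the reported index and length
theorem find_charact : ∀ (n : Nat) (xs : List Int) (i : Nat) (bi : Option Nat) (bl : Nat)
    (c L : Nat), xs.length ≤ n → findBestAux xs i bi bl = (some c, L) →
    (bi = some c ∧ bl = L) ∨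
    (∃ pre post, xs = pre ++ List.replicate L 0 ++ post ∧ i + pre.length = c ∧ bl < L ∧
      post.head? ≠ some 0) := by
  intro n
  induction n with
  | zero =>
    intro xs i bi bl c L hlen heq
    have hx : xs = [] := List.length_eq_zero_iff.mp (Nat.le_zero.mp hlen)
    subst hx
    rw [findBestAux] at heq
    exact Or.inl (by injection heq with h1 h2; exact ⟨h1, h2⟩)
  | succ n ih =>
    intro xs i bi bl c L hlen heq
    cases xs with
    | nil =>
      rw [findBestAux] at heq
      exact Or.inl (by injection heq with h1 h2; exact ⟨h1, h2⟩)
    | cons x rest =>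
      have hlen' : rest.length ≤ n := by simpa using hlen
      by_cases hx : x = 0
      · subst hx
        set w := zeroRunLen rest with hw
        have hdecomp : rest = List.replicate w 0 ++ rest.drop w := zeroRunLen_decomp rest
        have hhead : (rest.drop w).head? ≠ some 0 := zeroRunLen_head rest
        have hdroplen : (rest.drop w).length ≤ n := by
          have : (rest.drop w).length = rest.length - w := List.length_drop
          omega
        have hB : findBestAux ((0:Int) :: rest) i bi bl
            = if w + 1 > bl then findBestAux (rest.drop w) (i + (w + 1)) (some i) (w + 1)
              else findBestAux (rest.drop w) (i + (w + 1)) bi bl := by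
          rw [findBestAux]
          simp [zeroRunLen, ← hw]
        rw [hB] at heq
        by_cases hzb : w + 1 > bl
        · rw [if_pos hzb] at heq
          rcases ih (rest.drop w) (i + (w + 1)) (some i) (w + 1) c L hdroplen heq with h | h
          · -- the reported run is this very run
            refine Or.inr ⟨[], rest.drop w, ?_, ?_, ?_, ?_⟩
            · obtain ⟨h1, h2⟩ := h
              injection h1 with h1'
              subst h1'
              rw [← h2]
              simp only [List.replicate_succ, List.nil_append, List.cons_append]
              exact congrArg _ hdecomp
            · simpa using Option.some.inj h.1
            · omega
            · exact hhead
          · obtain ⟨pre, post, hxs, hidx, hbl', hph⟩ := h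
            refine Or.inr ⟨(0 :: List.replicate w 0) ++ pre, post, ?_, ?_, ?_, hph⟩
            · conv_lhs => rw [show ((0:Int) :: rest) = 0 :: (List.replicate w 0 ++ rest.drop w) from by rw [← hdecomp]]
              rw [hxs]
              simp
            · simp
              omega
            · omega
        · rw [if_neg hzb] at heq
          rcases ih (rest.drop w) (i + (w + 1)) bi bl c L hdroplen heq with h | h
          · exact Or.inl h
          · obtain ⟨pre, post, hxs, hidx, hbl', hph⟩ := h
            refine Or.inr ⟨(0 :: List.replicate w 0) ++ pre, post, ?_, ?_, hbl', hph⟩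
            · conv_lhs => rw [show ((0:Int) :: rest) = 0 :: (List.replicate w 0 ++ rest.drop w) from by rw [← hdecomp]]
              rw [hxs]
              simp
            · simp
              omega
      · rw [findBestAux, if_neg hx] at heq
        rcases ih rest (i + 1) bi bl c L hlen' heq with h | h
        · exact Or.inl h
        · obtain ⟨pre, post, hxs, hidx, hbl', hph⟩ := h
          refine Or.inr ⟨x :: pre, post, ?_, ?_, hbl', hph⟩
          · rw [hxs]; simp
          · simp
            omega

-- A's serializer over a stretch the compress index never hits
theorem serA_normal (xs : List Int) : ∀ (i : Int) (compress : Option Int) (out : List String),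
    (∀ j : Int, i ≤ j → compress ≠ some j) →
    serAAux xs i compress false out = out ++ normToks xs i := by
  induction xs with
  | nil => intro i compress out _; simp [serAAux, normToks]
  | cons p rest ih =>
    intro i compress out hc
    simp only [serAAux]
    rw [if_neg (by simp)]
    rw [if_neg (hc i le_rfl)]
    rw [ih (i + 1) compress _ (fun j hj => hc j (by omega))]
    simp [normToks]

-- A's serializer up to the compress index
theorem serA_prefix (pre : List Int) : ∀ (rest : List Int) (i : Int) (c : Int) (out : List String),
    i + pre.length ≤ c →
    serAAux (pre ++ rest) i (some c) false out
      = serAAux rest (i + pre.length) (some c) false (out ++ normToks pre i) := by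
  induction pre with
  | nil => intro rest i c out _; simp [normToks]
  | cons p pr ih =>
    intro rest i c out hle
    simp only [List.cons_append, serAAux]
    rw [if_neg (by simp)]
    rw [if_neg (by
      intro h
      injection h with h'
      simp at hle
      omega)]
    rw [ih rest (i + 1) c _ (by simp at hle ⊢; omega)]
    simp only [normToks]
    congr 1
    · push_cast [List.length_cons]; ring
    · simp

-- A's serializer skipping zeros while ignore_zero is set
theorem serA_skip (k : Nat) : ∀ (rest : List Int) (i : Int) (compress : Option Int)
    (out : List String),
    serAAux (List.replicate k 0 ++ rest) i compress true out
      = serAAux rest (i + k) compress true out := by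
  induction k with
  | zero => intro rest i compress out; simp
  | succ k ih =>
    intro rest i compress out
    rw [List.replicate_succ]
    simp only [List.cons_append, serAAux]
    rw [if_pos (by simp)]
    rw [ih]
    congr 1
    push_cast; ring

-- a nonzero piece clears ignore_zero
theorem serA_reset (p : Int) (rest : List Int) (i : Int) (compress : Option Int)
    (out : List String) (hp : p ≠ 0) :
    serAAux (p :: rest) i compress true out = serAAux (p :: rest) i compress false out := by
  simp [serAAux, hp]

-- joined normal tokens = B's chunk
theorem join0_cons (s : String) (l : List String) :
    PySem.Str.join "" (s :: l) = s ++ PySem.Str.join "" l := by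
  apply String.toList_inj.mp
  simp [chars_join0]

theorem normToks_chunk (xs : List Int) : ∀ (i : Int),
    PySem.Str.join "" (normToks xs i) = chunkB (xs.map pyHex) i := by
  induction xs with
  | nil => intro i; simp [normToks, chunkB, PySem.List.enumerate_nil]
  | cons p rest ih =>
    intro i
    simp only [normToks, List.map_cons, chunkB, PySem.List.enumerate_cons, List.map_cons]
    rw [join0_cons]
    rw [join0_append, ih (i + 1)]
    apply String.toList_inj.mp
    by_cases h7 : i = 7
    · simp [h7, chunkB, chars_join0]
    · simp [h7, chunkB, chars_join0]

theorem main_equiv (address : List Int) :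
    serialize_ipv6_py address = serialize_ipv6_py_alt address := by
  have hfc : findCompress address
      = ((findBestAux address 0 none 1).1).map (fun m : Nat => (m : Int)) := by
    simpa [findCompress] using find_equiv address.length address 0 none 1 le_rfl le_rfl
  unfold serialize_ipv6_py serialize_ipv6_py_alt
  rcases hfb : findBestAux address 0 none 1 with ⟨bi, bl⟩
  rw [hfb] at hfc
  cases bi with
  | none =>
    simp only [hfb]
    simp only [Option.map_none] at hfc
    rw [hfc]
    rw [serA_normal address 0 none [] (by intro j _ h; cases h)]
    simp only [List.nil_append]
    rw [normToks_chunk]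
  | some c =>
    simp only [hfb]
    simp only [Option.map_some] at hfc
    rcases find_charact address.length address 0 none 1 c bl le_rfl hfb with ⟨h1, _⟩ | h
    · cases h1
    obtain ⟨pre, post, hxs, hidx, hbl, hph⟩ := h
    obtain ⟨m, hm⟩ : ∃ m, bl = m + 1 := ⟨bl - 1, by omega⟩
    have hcpre : c = pre.length := by omega
    -- A side
    have hA1 : serAAux address 0 (some (c : Int)) false []
        = serAAux (List.replicate bl 0 ++ post) ((0 : Int) + pre.length) (some (c : Int)) false
            ([] ++ normToks pre 0) := by
      conv_lhs => rw [hxs, List.append_assoc]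
      exact serA_prefix pre _ 0 (c : Int) [] (by simp; omega)
    have hidx2 : ((0 : Int) + pre.length) = (c : Int) := by omega
    have hA2 : serAAux (List.replicate bl 0 ++ post) ((c : Int)) (some (c : Int)) false
          ([] ++ normToks pre 0)
        = serAAux (List.replicate m 0 ++ post) ((c : Int) + 1) (some (c : Int)) true
            (([] ++ normToks pre 0) ++ [if (c : Int) = 0 then "::" else ":"]) := by
      rw [hm, List.replicate_succ]
      simp only [List.cons_append, serAAux]
      rw [if_neg (by simp), if_pos trivial]
    have hA3 : serAAux (List.replicate m 0 ++ post) ((c : Int) + 1) (some (c : Int)) true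
          (([] ++ normToks pre 0) ++ [if (c : Int) = 0 then "::" else ":"])
        = (([] ++ normToks pre 0) ++ [if (c : Int) = 0 then "::" else ":"])
            ++ normToks post ((c : Int) + 1 + m) := by
      rw [serA_skip]
      cases post with
      | nil => simp [serAAux, normToks]
      | cons q r =>
        have hq : q ≠ 0 := by intro h; exact hph (by simp [h])
        rw [serA_reset _ _ _ _ _ hq]
        rw [serA_normal _ _ _ _ (by
          intro j hj h
          injection h with h'
          omega)]
    rw [hfc, hA1, hidx2, hA2, hA3]
    -- B side
    have htake : (address.map pyHex).take c = pre.map pyHex := by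
      rw [hxs, hcpre]
      rw [show List.map pyHex (pre ++ List.replicate bl 0 ++ post)
            = List.map pyHex pre ++ (List.map pyHex (List.replicate bl 0) ++ List.map pyHex post)
          from by simp]
      exact List.take_left' (by simp)
    have hdrop : (address.map pyHex).drop (c + bl) = post.map pyHex := by
      rw [hxs, hcpre]
      rw [show List.map pyHex (pre ++ List.replicate bl 0 ++ post)
            = (List.map pyHex pre ++ List.map pyHex (List.replicate bl 0)) ++ List.map pyHex post
          from by simp]
      exact List.drop_left' (by simp)
    rw [htake, hdrop, ← normToks_chunk, ← normToks_chunk]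
    have hidx3 : ((c : Int) + 1 + m) = ((c : Nat) : Int) + ((bl : Nat) : Int) := by
      omega
    rw [hidx3]
    rw [join0_append, join0_append, join0_singleton]
    apply String.toList_inj.mp
    by_cases hc0 : c = 0
    · simp [hc0]
    · simp [hc0]

-- ===== VERDICT (by name: the statement is the Claim_ definition above) =====
theorem serialize_ipv6_py_spec : Claim_equal_serialize_ipv6_py := by
  intro address _hdom
  unfold Spec_serialize_ipv6_py
  exact main_equiv address
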